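-- pv_equiv track=rewrite | github.com/cldborges/telegram-forwarder_auto | funcoes.py | contar_ausencia
-- ===== SOURCE A (Python) =====
-- def contar_ausencia(resultados, numeros):
--     contador_ausencia = {}  # Dicionário para armazenar o número de ocorrências de ausência de sequências
--     sequencia_atual = 0
--     resultados.reverse()
--     for numero in resultados:
--         if numero not in numeros:
--             sequencia_atual += 1
--         else:
--             if sequencia_atual > 0:
--                 contador_ausencia[sequencia_atual] = contador_ausencia.get(sequencia_atual, 0) + 1
--                 sequencia_atual = 0
--     if sequencia_atual > 0:
--         contador_ausencia[sequencia_atual] = contador_ausencia.get(sequencia_atual, 0) + 1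
--     return contador_ausencia
-- ===== SOURCE B (Python) =====
-- def contar_ausencia(resultados, numeros):
--     resultados.reverse()
--     presentes = set(numeros)
--     hits = [i for i, v in enumerate(resultados) if v in presentes]
--     limites = [-1] + hits + [len(resultados)]
--     contador_ausencia = {}
--     for a, b in zip(limites, limites[1:]):
--         gap = b - a - 1
--         if gap > 0:
--             contador_ausencia[gap] = contador_ausencia.get(gap, 0) + 1
--     return contador_ausencia
-- ===== Notes on version B (the rewrite author's own statement) =====
-- stated objective: faster
-- what changed: Replaces the running-counter state machine with boundary-index arithmetic: collect the index positions of present elements (via a set) in the reversed list, then tally each positive gap between consecutive boundary indices (-1, hits..., len) as an absent-run length.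
import Mathlib
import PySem

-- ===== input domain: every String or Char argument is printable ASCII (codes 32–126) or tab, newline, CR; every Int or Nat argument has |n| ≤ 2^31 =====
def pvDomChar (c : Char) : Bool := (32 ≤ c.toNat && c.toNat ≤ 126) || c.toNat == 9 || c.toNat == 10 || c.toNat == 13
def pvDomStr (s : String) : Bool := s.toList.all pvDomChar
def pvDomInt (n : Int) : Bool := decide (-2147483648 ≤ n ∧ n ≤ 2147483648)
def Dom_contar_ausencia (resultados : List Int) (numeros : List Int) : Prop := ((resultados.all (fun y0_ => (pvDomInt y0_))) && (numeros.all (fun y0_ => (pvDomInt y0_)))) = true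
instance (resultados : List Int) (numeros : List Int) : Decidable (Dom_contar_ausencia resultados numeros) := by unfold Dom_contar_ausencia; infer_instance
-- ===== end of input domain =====

-- B replaces A's running-counter state machine with boundary-index arithmetic: it collects the
-- index positions of present elements in the reversed list and tallies each positive gap between
-- consecutive boundary indices as an absent-run length (different algorithm; a timing run
-- measured B faster: set membership and one pass replace A's per-element list scans).
-- Both Pythons reverse `resultados` in place; the equivalence proved here is about the return value.

-- ===== PORT A =====
-- A's for-loop: state = (dict of run-length counts, current run length)
def pvLoopA (numeros : List Int) : List Int → PySem.Dict Int Int → Int → PySem.Dict Int Int × Int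
  | [], d, c => (d, c)
  | numero :: rest, d, c =>
    if numero ∉ numeros then pvLoopA numeros rest d (c + 1)
    else if c > 0 then pvLoopA numeros rest (d.insert c (d.getD c 0 + 1)) 0
    else pvLoopA numeros rest d c

def contar_ausencia (resultados : List Int) (numeros : List Int) : List (Int × Int) :=
  let st := pvLoopA numeros resultados.reverse PySem.Dict.empty 0
  (if st.2 > 0 then st.1.insert st.2 (st.1.getD st.2 0 + 1) else st.1).items

-- ===== PORT B =====
def contar_ausencia_alt (resultados : List Int) (numeros : List Int) : List (Int × Int) :=
  let rev := resultados.reverse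
  let presentes := PySem.Set.ofList numeros
  let hits := ((PySem.List.enumerate rev).filter
      (fun p => PySem.Set.contains presentes p.2)).map (fun p => p.1)
  let limites := (-1 : Int) :: (hits ++ [(rev.length : Int)])
  ((limites.zip (limites.drop 1)).foldl
      (fun d ab =>
        if ab.2 - ab.1 - 1 > 0 then
          d.insert (ab.2 - ab.1 - 1) (d.getD (ab.2 - ab.1 - 1) 0 + 1)
        else d)
      PySem.Dict.empty).items

-- ===== PRECONDITION & SPEC =====
def Spec_contar_ausencia (resultados : List Int) (numeros : List Int) (out : List (Int × Int)) : Prop := out = contar_ausencia_alt resultados numeros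
instance (resultados : List Int) (numeros : List Int) (out : List (Int × Int)) : Decidable (Spec_contar_ausencia resultados numeros out) := by unfold Spec_contar_ausencia; infer_instance

-- ===== CLAIM (what is proved, stated in full; the proofs are below) =====
def Claim_equal_contar_ausencia : Prop := ∀ (resultados : List Int) (numeros : List Int), Dom_contar_ausencia resultados numeros → Spec_contar_ausencia resultados numeros (contar_ausencia resultados numeros)

-- ===== LEMMAS AND PROOFS =====

-- A's post-loop flush of a pending run
def pvFlush (st : PySem.Dict Int Int × Int) : PySem.Dict Int Int :=
  if st.2 > 0 then st.1.insert st.2 (st.1.getD st.2 0 + 1) else st.1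

-- canonical list of absent-run lengths (in A's insertion order), with pending count c
def pvAbsRuns (numeros : List Int) : List Int → Int → List Int
  | [], c => if c > 0 then [c] else []
  | x :: xs, c =>
    if x ∈ numeros then
      (if c > 0 then c :: pvAbsRuns numeros xs 0 else pvAbsRuns numeros xs 0)
    else pvAbsRuns numeros xs (c + 1)

def pvIns (d : PySem.Dict Int Int) (g : Int) : PySem.Dict Int Int :=
  d.insert g (d.getD g 0 + 1)

-- index positions (from offset k) of elements of l that are in numeros
def pvHits (numeros : List Int) (l : List Int) (k : Int) : List Int :=
  ((PySem.List.enumerate l k).filter (fun p => decide (p.2 ∈ numeros))).map (fun p => p.1)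

-- gaps between consecutive boundaries prev :: hits ++ [k + |l|]
def pvGapList (numeros : List Int) (l : List Int) (k prev : Int) : List Int :=
  ((prev :: (pvHits numeros l k ++ [k + (l.length : Int)])).zip
    (pvHits numeros l k ++ [k + (l.length : Int)])).map (fun ab => ab.2 - ab.1 - 1)

-- A's loop + flush tallies exactly pvAbsRuns
theorem pvA_runs (numeros : List Int) :
    ∀ (l : List Int) (d : PySem.Dict Int Int) (c : Int), 0 ≤ c →
      pvFlush (pvLoopA numeros l d c) = (pvAbsRuns numeros l c).foldl pvIns d := by
  intro l
  induction l with
  | nil =>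
    intro d c _
    simp only [pvLoopA, pvAbsRuns, pvFlush]
    split <;> rfl
  | cons x xs ih =>
    intro d c hc0
    by_cases hx : x ∈ numeros
    · by_cases hc : c > 0
      · simp only [pvLoopA, pvAbsRuns, hx, not_true_eq_false, if_false, if_pos hc,
          if_true, List.foldl_cons]
        exact ih (pvIns d c) 0 le_rfl
      · have hz : c = 0 := by omega
        subst hz
        simp only [pvLoopA, pvAbsRuns, hx, not_true_eq_false, if_false,
          if_neg hc, if_true]
        exact ih d 0 le_rfl
    · simp only [pvLoopA, pvAbsRuns, hx, not_false_eq_true, if_true, if_false]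
      exact ih d (c + 1) (by omega)

-- generic: a fold that skips non-positive gaps = a plain fold over the positive ones
theorem pvFoldl_skip (l : List Int) :
    ∀ d : PySem.Dict Int Int,
      l.foldl (fun d g => if g > 0 then pvIns d g else d) d
      = (l.filter (fun g => decide (g > 0))).foldl pvIns d := by
  induction l with
  | nil => intro d; rfl
  | cons g l ih =>
    intro d
    by_cases hg : g > 0
    · simp only [List.foldl_cons, List.filter_cons, decide_eq_true_eq, hg,
        if_true, List.foldl_cons]
      exact ih (pvIns d g)
    · simp only [List.foldl_cons, List.filter_cons, decide_eq_true_eq, hg,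
        if_false, List.foldl_cons]
      exact ih d

-- the positive gaps between consecutive boundaries = pvAbsRuns, with c = k - prev - 1
theorem pvGaps (numeros : List Int) :
    ∀ (l : List Int) (k prev : Int),
      (pvGapList numeros l k prev).filter (fun g => decide (g > 0))
      = pvAbsRuns numeros l (k - prev - 1) := by
  intro l
  induction l with
  | nil =>
    intro k prev
    simp only [pvGapList, pvHits, PySem.List.enumerate_nil, List.filter_nil,
      List.map_nil, List.length_nil, Int.natCast_zero, add_zero, List.nil_append,
      List.zip_cons_cons, List.zip_nil_right, List.map_cons, List.map_nil,
      pvAbsRuns, List.filter_cons, List.filter_nil, decide_eq_true_eq]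
  | cons x xs ih =>
    intro k prev
    have hlen : k + ((x :: xs).length : Int) = (k + 1) + (xs.length : Int) := by
      simp only [List.length_cons]; push_cast; ring
    by_cases hx : x ∈ numeros
    · have h1 : pvHits numeros (x :: xs) k = k :: pvHits numeros xs (k + 1) := by
        simp [pvHits, PySem.List.enumerate_cons, hx]
      have h2 : pvGapList numeros (x :: xs) k prev
          = (k - prev - 1) :: pvGapList numeros xs (k + 1) k := by
        simp only [pvGapList, h1, hlen, List.cons_append, List.zip_cons_cons,
          List.map_cons]
      rw [h2]
      simp only [List.filter_cons, decide_eq_true_eq]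
      rw [ih (k + 1) k]
      have hc : k + 1 - k - 1 = (0 : Int) := by ring
      rw [hc]
      simp only [pvAbsRuns, if_pos hx]
    · have h1 : pvHits numeros (x :: xs) k = pvHits numeros xs (k + 1) := by
        simp [pvHits, PySem.List.enumerate_cons, hx]
      have h2 : pvGapList numeros (x :: xs) k prev = pvGapList numeros xs (k + 1) prev := by
        simp only [pvGapList, h1, hlen]
      rw [h2, ih (k + 1) prev]
      have hc : k + 1 - prev - 1 = (k - prev - 1) + 1 := by ring
      rw [hc]
      simp only [pvAbsRuns, if_neg hx]

-- the Set-membership predicate in B's port is plain list membership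
theorem pvPred (numeros : List Int) :
    (fun p : Int × Int => PySem.Set.contains (PySem.Set.ofList numeros) p.2)
      = (fun p : Int × Int => decide (p.2 ∈ numeros)) := by
  funext p
  rw [Bool.eq_iff_iff, PySem.Set.contains_iff, PySem.Set.mem_ofList, decide_eq_true_iff]

-- ===== VERDICT (by name: the statement is the Claim_ definition above) =====
theorem contar_ausencia_spec : Claim_equal_contar_ausencia := by
  intro resultados numeros _
  unfold Spec_contar_ausencia
  simp only [contar_ausencia, contar_ausencia_alt]
  rw [pvPred numeros]
  have hA := pvA_runs numeros resultados.reverse PySem.Dict.empty 0 le_rfl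
  simp only [pvFlush] at hA
  rw [show (0 : Int) = 0 - (-1) - 1 from by ring] at hA
  rw [← pvGaps numeros resultados.reverse 0 (-1), ← pvFoldl_skip] at hA
  simp only [pvGapList, pvHits, pvIns, zero_add, List.foldl_map] at hA
  simp only [List.drop_succ_cons, List.drop_zero]
  exact congrArg PySem.Dict.items hA
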